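-- pv_equiv track=rewrite | github.com/blzzua/codewars | 6-kyu/simple_fun_290_sum_of_threes.py | sum_of_threes
-- ===== SOURCE A (Python) =====
-- def sum_of_threes(n):
--     base3 = []
--     while n != 0:
--         if n % 3 == 2:
--             return 'Impossible'
--         base3.append(n % 3)
--         n = n//3
--     res = []
--     for i, power in enumerate(base3):
--         if power: # power == 1:
--             res.append(f'3^{i}')
--     return '+'.join(res[::-1])
-- ===== SOURCE B (Python) =====
-- def sum_of_threes(n):
--     # Greedy from the largest power of 3 downward, building the answer
--     # in descending order directly (no digit array, no final reversal).
--     p, k = 1, 0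
--     while p * 3 <= n:
--         p, k = p * 3, k + 1
--     r, parts = n, []
--     while p >= 1:
--         if p <= r:
--             r -= p
--             if p <= r:
--                 return 'Impossible'
--             parts.append(f'3^{k}')
--         p, k = p // 3, k - 1
--     return 'Impossible' if r != 0 else '+'.join(parts)
-- ===== Notes on version B (the rewrite author's own statement) =====
-- stated objective: alternative
-- what changed: B replaces A's LSB-first base-3 digit extraction (digit list, enumerate/filter, final reversal) by an MSB-first greedy subtraction over precomputed powers of 3 that emits the '3^k' terms directly in descending order, detecting impossibility when a power would be needed twice or a remainder is left.
import Mathlib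
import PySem

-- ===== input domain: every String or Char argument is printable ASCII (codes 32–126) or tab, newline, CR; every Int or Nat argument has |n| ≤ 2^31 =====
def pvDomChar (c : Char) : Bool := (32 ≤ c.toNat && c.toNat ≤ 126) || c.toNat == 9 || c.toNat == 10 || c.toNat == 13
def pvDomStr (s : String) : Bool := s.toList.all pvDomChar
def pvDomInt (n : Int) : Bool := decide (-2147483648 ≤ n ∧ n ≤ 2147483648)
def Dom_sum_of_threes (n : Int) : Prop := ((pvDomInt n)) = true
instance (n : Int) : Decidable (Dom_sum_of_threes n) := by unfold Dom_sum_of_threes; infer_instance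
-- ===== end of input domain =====

-- B rebuilds the answer MSB-first by greedy subtraction of powers of 3 (no digit list, no reversal);
-- same return value as A everywhere (alternative decomposition, no speed claim).

-- ===== PORT A =====
-- the 'while n != 0' digit loop of A (returns none where A returns 'Impossible' early)
def loopA (n : Int) (acc : List Int) : Option (List Int) :=
  if _hn : n = 0 then some acc
  else if h2 : PySem.Int.mod n 3 = 2 then none
  else loopA (PySem.Int.floordiv n 3) (acc ++ [PySem.Int.mod n 3])
termination_by n.natAbs
decreasing_by
  rw [PySem.Int.floordiv_eq_ediv_of_pos (by omega : (0:Int) < 3)]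
  rw [PySem.Int.mod_eq_emod_of_pos (by omega : (0:Int) < 3)] at h2
  omega

def sum_of_threes (n : Int) : String :=
  match loopA n [] with
  | none => "Impossible"
  | some base3 =>
      let res := (PySem.List.enumerate base3).foldl
        (fun res ip => if ip.2 ≠ 0 then res ++ ["3^" ++ PySem.Int.toStr ip.1] else res) []
      PySem.Str.join "+" ((PySem.List.slice? res none none (-1)).getD [])

-- ===== PORT B =====
-- 'while p * 3 <= n: p, k = p * 3, k + 1'; the '1 ≤ p' conjunct is a totality guard only
-- (the entry call has p = 1 and p only triples, so it is always true there)
def loop1B (n p k : Int) : Int × Int :=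
  if 1 ≤ p ∧ p * 3 ≤ n then loop1B n (p * 3) (k + 1) else (p, k)
termination_by (n + 1 - p).toNat
decreasing_by omega

-- 'while p >= 1: …' greedy loop of B
def loop2B (p k r : Int) (parts : List String) : String :=
  if 1 ≤ p then
    if p ≤ r then
      if p ≤ r - p then "Impossible"
      else loop2B (PySem.Int.floordiv p 3) (k - 1) (r - p) (parts ++ ["3^" ++ PySem.Int.toStr k])
    else loop2B (PySem.Int.floordiv p 3) (k - 1) r parts
  else if r ≠ 0 then "Impossible" else PySem.Str.join "+" parts
termination_by p.toNat
decreasing_by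
  all_goals rw [PySem.Int.floordiv_eq_ediv_of_pos (by omega : (0:Int) < 3)]; omega

def sum_of_threes_alt (n : Int) : String :=
  let pk := loop1B n 1 0
  loop2B pk.1 pk.2 n []

-- ===== PRECONDITION & SPEC =====
def Spec_sum_of_threes (n : Int) (out : String) : Prop := out = sum_of_threes_alt n
instance (n : Int) (out : String) : Decidable (Spec_sum_of_threes n out) := by unfold Spec_sum_of_threes; infer_instance

-- ===== CLAIM (what is proved, stated in full; the proofs are below) =====
def Claim_equal_sum_of_threes : Prop := ∀ (n : Int), Dom_sum_of_threes n → Spec_sum_of_threes n (sum_of_threes n)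

-- ===== LEMMAS AND PROOFS =====

-- base-3 digit list of N, least significant first (what A's while loop builds)
def D3 (n : Nat) : List Int :=
  if n = 0 then [] else ((n % 3 : Nat) : Int) :: D3 (n / 3)
termination_by n
decreasing_by exact Nat.div_lt_self (by omega) (by omega)

-- N is a sum of distinct powers of 3 (no base-3 digit equals 2)
def OK3 (n : Nat) : Bool :=
  if n = 0 then true else (n % 3 != 2) && OK3 (n / 3)
termination_by n
decreasing_by exact Nat.div_lt_self (by omega) (by omega)

-- exponents with digit 1, in DESCENDING order
def E3 (n : Nat) : List Nat :=
  if n = 0 then [] else ((E3 (n / 3)).map (· + 1)) ++ (if n % 3 = 1 then [0] else [])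
termination_by n
decreasing_by all_goals exact Nat.div_lt_self (by omega) (by omega)

def fmt3 (es : List Nat) : List String := es.map (fun e : Nat => "3^" ++ PySem.Int.toStr (e : Int))

lemma OK3_unfold (m : Nat) : OK3 m = ((m % 3 != 2) && OK3 (m / 3)) := by
  rw [OK3]
  rcases Nat.eq_zero_or_pos m with h | h
  · subst h; simp [OK3]
  · simp [Nat.pos_iff_ne_zero.mp h]

lemma E3_unfold (m : Nat) : E3 m = ((E3 (m / 3)).map (· + 1)) ++ (if m % 3 = 1 then [0] else []) := by
  rw [E3]
  rcases Nat.eq_zero_or_pos m with h | h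
  · subst h; simp [E3]
  · simp [Nat.pos_iff_ne_zero.mp h]

lemma OK3_msb : ∀ (e : Nat) (R : Nat), R < 3 ^ (e + 1) →
    OK3 R = ((R / 3 ^ e != 2) && OK3 (R % 3 ^ e)) := by
  intro e
  induction e with
  | zero =>
    intro R hR
    rw [OK3_unfold R]
    have h1 : R / 3 = 0 := by omega
    have h2 : R % 3 = R := by omega
    have h0 : OK3 0 = true := by rw [OK3]; simp
    simp [h1, h2, h0, Nat.mod_one]
  | succ e ih =>
    intro R hR
    rw [OK3_unfold R, ih (R / 3) (by rw [Nat.div_lt_iff_lt_mul (by omega)]; rw [pow_succ] at hR; omega),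
        OK3_unfold (R % 3 ^ (e + 1))]
    have h1 : R / 3 / 3 ^ e = R / 3 ^ (e + 1) := by
      rw [Nat.div_div_eq_div_mul, ← pow_succ']
    have h2 : R % 3 ^ (e + 1) % 3 = R % 3 := by
      apply Nat.mod_mod_of_dvd; exact ⟨3 ^ e, by rw [pow_succ']⟩
    have h3 : R % 3 ^ (e + 1) / 3 = R / 3 % 3 ^ e := by
      rw [← Nat.mod_mul_right_div_self, ← pow_succ']
    rw [h1, h2, h3]
    rw [← Bool.and_assoc, ← Bool.and_assoc, Bool.and_comm (R % 3 != 2)]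

lemma E3_msb : ∀ (e : Nat) (R : Nat), R < 3 ^ (e + 1) → R / 3 ^ e = 1 →
    E3 R = e :: E3 (R % 3 ^ e) := by
  intro e
  induction e with
  | zero =>
    intro R hR hd
    simp at hd
    subst hd
    simp [E3]
  | succ e ih =>
    intro R hR hd
    have h1 : R / 3 / 3 ^ e = R / 3 ^ (e + 1) := by
      rw [Nat.div_div_eq_div_mul, ← pow_succ']
    have h2 : R % 3 ^ (e + 1) % 3 = R % 3 := by
      apply Nat.mod_mod_of_dvd; exact ⟨3 ^ e, by rw [pow_succ']⟩
    have h3 : R % 3 ^ (e + 1) / 3 = R / 3 % 3 ^ e := by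
      rw [← Nat.mod_mul_right_div_self, ← pow_succ']
    rw [E3_unfold R, ih (R / 3) (by rw [Nat.div_lt_iff_lt_mul (by omega)]; rw [pow_succ] at hR; omega) (by rw [h1, hd]),
        E3_unfold (R % 3 ^ (e + 1)), h2, h3]
    simp

lemma loopA_spec : ∀ (N : Nat) (acc : List Int),
    loopA (N : Int) acc = if OK3 N then some (acc ++ D3 N) else none := by
  intro N
  induction N using Nat.strong_induction_on with
  | _ N ih =>
    intro acc
    rw [loopA, OK3, D3]
    rcases Nat.eq_zero_or_pos N with h0 | h0
    · subst h0; simp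
    · have hne : (N : Int) ≠ 0 := by omega
      have hmod : PySem.Int.mod (N : Int) 3 = ((N % 3 : Nat) : Int) := by
        exact_mod_cast PySem.Int.mod_natCast N 3
      have hdiv : PySem.Int.floordiv (N : Int) 3 = ((N / 3 : Nat) : Int) := by
        exact_mod_cast PySem.Int.floordiv_natCast N 3
      simp only [hne, hmod, hdiv, Nat.pos_iff_ne_zero.mp h0]
      by_cases h2 : N % 3 = 2
      · simp [h2]
      · have h2' : ¬ ((N % 3 : Nat) : Int) = 2 := by omega
        rw [dif_neg h2', ih (N / 3) (Nat.div_lt_self h0 (by omega))]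
        simp [h2]
lemma loopA_neg : ∀ (m : Nat) (n : Int) (acc : List Int), n.natAbs ≤ m → n < 0 →
    loopA n acc = none := by
  intro m
  induction m with
  | zero => intro n acc hm hn; omega
  | succ m ih =>
    intro n acc hm hn
    rw [loopA]
    have hne : n ≠ 0 := by omega
    rw [dif_neg hne]
    by_cases h2 : PySem.Int.mod n 3 = 2
    · rw [dif_pos h2]
    · rw [dif_neg h2]
      rw [PySem.Int.mod_eq_emod_of_pos (by omega : (0:Int) < 3)] at h2
      rw [PySem.Int.floordiv_eq_ediv_of_pos (by omega : (0:Int) < 3)]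
      exact ih _ _ (by omega) (by omega)
lemma post_spec : ∀ (N : Nat) (s : Int), OK3 N = true →
    ((((PySem.List.enumerate (D3 N) s).filter (fun ip => ip.2 ≠ 0)).map
        (fun ip => "3^" ++ PySem.Int.toStr ip.1)).reverse)
      = (E3 N).map (fun e : Nat => "3^" ++ PySem.Int.toStr (s + (e : Int))) := by
  intro N
  induction N using Nat.strong_induction_on with
  | _ N ih =>
    intro s hOK
    rw [D3, E3]
    rcases Nat.eq_zero_or_pos N with h0 | h0
    · subst h0; simp [PySem.List.enumerate_nil]
    · have hne := Nat.pos_iff_ne_zero.mp h0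
      rw [OK3_unfold N] at hOK
      have hOKd : OK3 (N / 3) = true := by
        rcases Bool.and_eq_true_iff.mp hOK with ⟨_, h⟩; exact h
      have hd2 : N % 3 ≠ 2 := by
        rcases Bool.and_eq_true_iff.mp hOK with ⟨h, _⟩; simpa using h
      rw [if_neg hne, if_neg hne, PySem.List.enumerate_cons]
      have ihs := ih (N / 3) (Nat.div_lt_self h0 (by omega)) (s + 1) hOKd
      have hmap : ((E3 (N / 3)).map (· + 1)).map (fun e : Nat => "3^" ++ PySem.Int.toStr (s + (e : Int)))
          = (E3 (N / 3)).map (fun e : Nat => "3^" ++ PySem.Int.toStr (s + 1 + (e : Int))) := by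
        rw [List.map_map]
        apply List.map_congr_left
        intro a _
        simp only [Function.comp_apply]
        congr 1
        congr 1
        push_cast
        ring
      by_cases h1 : N % 3 = 1
      · have hz : ¬ (((N % 3 : Nat) : Int) = 0) := by omega
        rw [List.filter_cons]
        simp only [ne_eq, hz, not_false_iff, decide_true, if_pos, List.map_cons,
          List.reverse_cons, if_pos h1, List.map_append, ihs, hmap]
        simp
      · have hz : (((N % 3 : Nat) : Int) = 0) := by omega
        rw [List.filter_cons]
        simp only [ne_eq, hz, decide_not, decide_true, Bool.not_true, if_neg h1,
          List.append_nil, hmap]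
        simp only [ne_eq, decide_not] at ihs
        exact ihs
lemma A_nonneg (N : Nat) :
    sum_of_threes (N : Int) = if OK3 N then PySem.Str.join "+" (fmt3 (E3 N)) else "Impossible" := by
  unfold sum_of_threes
  rw [loopA_spec N []]
  by_cases h : OK3 N
  · rw [if_pos h, if_pos h]
    simp only [List.nil_append]
    rw [show (fun (res : List String) (ip : Int × Int) =>
          if ip.2 ≠ 0 then res ++ ["3^" ++ PySem.Int.toStr ip.1] else res)
        = (fun (res : List String) (ip : Int × Int) =>
          if (decide (ip.2 ≠ 0)) = true then res ++ ["3^" ++ PySem.Int.toStr ip.1] else res) from by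
        funext res ip; simp]
    rw [PySem.List.foldl_append_if, PySem.List.slice?_none_none_neg_one]
    simp only [Option.getD_some, List.nil_append]
    rw [post_spec N 0 h]
    unfold fmt3
    simp
  · rw [if_neg h, if_neg h]
lemma fdiv_pow (e : Nat) : PySem.Int.floordiv ((3:Int) ^ (e + 1)) 3 = (3:Int) ^ e := by
  rw [PySem.Int.floordiv_eq_ediv_of_pos (by omega : (0:Int) < 3), pow_succ,
    Int.mul_ediv_cancel _ (by omega)]

lemma loop1B_spec (n : Int) : ∀ (M : Nat) (e : Nat), (n + 1 - 3 ^ e).toNat ≤ M →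
    ∃ f : Nat, loop1B n ((3:Int) ^ e) (e : Int) = ((3:Int) ^ f, (f : Int)) ∧ n < 3 ^ (f + 1) := by
  intro M
  induction M with
  | zero =>
    intro e hM
    have hp : (1:Int) ≤ 3 ^ e := one_le_pow₀ (by omega)
    have hstop : ¬ ((1:Int) ≤ 3 ^ e ∧ 3 ^ e * 3 ≤ n) := by omega
    rw [loop1B, if_neg hstop]
    exact ⟨e, rfl, by rw [pow_succ]; omega⟩
  | succ M ih =>
    intro e hM
    have hp : (1:Int) ≤ 3 ^ e := one_le_pow₀ (by omega)
    rw [loop1B]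
    by_cases hc : (1:Int) ≤ 3 ^ e ∧ 3 ^ e * 3 ≤ n
    · rw [if_pos hc]
      have h31 : (3:Int) ^ e * 3 = 3 ^ (e + 1) := by rw [pow_succ]
      have hk : ((e : Int) + 1) = ((e + 1 : Nat) : Int) := by push_cast; ring
      rw [h31, hk]
      apply ih
      have : (3:Int) ^ (e + 1) ≥ 3 ^ e + 2 := by rw [pow_succ]; omega
      omega
    · rw [if_neg hc]
      exact ⟨e, rfl, by rw [pow_succ]; omega⟩

lemma loop2B_spec : ∀ (e : Nat) (R : Nat) (parts : List String), R < 3 ^ (e + 1) →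
    loop2B ((3:Int) ^ e) (e : Int) (R : Int) parts
      = if OK3 R then PySem.Str.join "+" (parts ++ fmt3 (E3 R)) else "Impossible" := by
  intro e
  induction e with
  | zero =>
    intro R parts hR
    have h0 : PySem.Int.floordiv (1:Int) 3 = 0 := by
      rw [PySem.Int.floordiv_eq_ediv_of_pos (by omega : (0:Int) < 3)]; decide
    interval_cases R
    · rw [loop2B]
      norm_num [h0]
      rw [loop2B]
      norm_num
      rw [show OK3 0 = true from by rw [OK3]; simp, show E3 0 = [] from by rw [E3]; simp]
      simp [fmt3]
    · rw [loop2B]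
      norm_num [h0]
      rw [loop2B]
      norm_num
      rw [show OK3 1 = true from by rw [OK3]; simp [OK3], show E3 1 = [0] from by rw [E3]; simp [E3]]
      simp [fmt3]
    · rw [loop2B]
      norm_num [h0]
      rw [show OK3 2 = false from by rw [OK3]; simp [OK3]]
      simp
  | succ e ih =>
    intro R parts hR
    have hp1 : (1:Int) ≤ 3 ^ (e + 1) := one_le_pow₀ (by omega)
    have hpow : (3:Nat) ^ (e + 1) ≤ 2 * 3 ^ (e + 1) := by omega
    have hcast : ((3:Nat) ^ (e + 1) : Int) = (3:Int) ^ (e + 1) := by push_cast; ring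
    have hkcast : ((e : Int) + 1) - 1 = (e : Int) := by ring
    have hk1 : (((e + 1 : Nat) : Int)) = (e : Int) + 1 := by push_cast; ring
    have hR3 : R < 3 * 3 ^ (e + 1) := by rw [pow_succ] at hR; omega
    rw [loop2B, if_pos hp1]
    rcases Nat.lt_or_ge R (3 ^ (e + 1)) with hlt | hge
    · -- hi digit 0
      have hler : ¬ ((3:Int) ^ (e + 1) ≤ (R : Int)) := by
        rw [← hcast]; exact_mod_cast by omega
      rw [if_neg hler, fdiv_pow, hk1, hkcast]
      exact ih R parts hlt
    · rcases Nat.lt_or_ge R (2 * 3 ^ (e + 1)) with hlt2 | hge2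
      · -- hi digit 1
        have hhi : R / 3 ^ (e + 1) = 1 := Nat.div_eq_of_lt_le (by omega) (by omega)
        have hmod : R % 3 ^ (e + 1) = R - 3 ^ (e + 1) := by
          rw [Nat.mod_eq_sub_mod hge, Nat.mod_eq_of_lt (by omega)]
        have hler : ((3:Int) ^ (e + 1) ≤ (R : Int)) := by
          rw [← hcast]; exact_mod_cast hge
        have hler2 : ¬ ((3:Int) ^ (e + 1) ≤ (R : Int) - 3 ^ (e + 1)) := by
          rw [← hcast]; push_cast; omega
        rw [if_pos hler, if_neg hler2, fdiv_pow, hk1, hkcast]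
        have hsub : (R : Int) - 3 ^ (e + 1) = ((R - 3 ^ (e + 1) : Nat) : Int) := by
          rw [← hcast]; push_cast [hge]; ring
        rw [hsub, ih (R - 3 ^ (e + 1)) _ (by omega)]
        rw [OK3_msb (e + 1) R hR, E3_msb (e + 1) R hR hhi, hhi, hmod]
        simp only [show ((1:Nat) != 2) = true from rfl, Bool.true_and]
        by_cases hok : OK3 (R - 3 ^ (e + 1))
        · rw [if_pos hok, if_pos hok]
          unfold fmt3
          simp [hk1]
        · rw [if_neg hok, if_neg hok]
      · -- hi digit 2
        have hhi : R / 3 ^ (e + 1) = 2 := Nat.div_eq_of_lt_le (by omega) (by omega)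
        have hler : ((3:Int) ^ (e + 1) ≤ (R : Int)) := by
          rw [← hcast]; exact_mod_cast by omega
        have hler2 : ((3:Int) ^ (e + 1) ≤ (R : Int) - 3 ^ (e + 1)) := by
          rw [← hcast]; push_cast; omega
        rw [if_pos hler, if_pos hler2]
        rw [OK3_msb (e + 1) R hR, hhi]
        simp

lemma B_neg (n : Int) (hn : n < 0) : sum_of_threes_alt n = "Impossible" := by
  unfold sum_of_threes_alt
  rw [loop1B, if_neg (by omega : ¬ ((1:Int) ≤ 1 ∧ (1:Int) * 3 ≤ n))]
  simp only
  rw [loop2B, if_pos (by omega : (1:Int) ≤ 1), if_neg (by omega : ¬ ((1:Int) ≤ n))]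
  rw [show PySem.Int.floordiv (1:Int) 3 = 0 from by
    rw [PySem.Int.floordiv_eq_ediv_of_pos (by omega : (0:Int) < 3)]; decide]
  rw [loop2B, if_neg (by omega : ¬ ((1:Int) ≤ 0)), if_pos (by omega : n ≠ 0)]

lemma B_nonneg (N : Nat) :
    sum_of_threes_alt (N : Int) = if OK3 N then PySem.Str.join "+" (fmt3 (E3 N)) else "Impossible" := by
  unfold sum_of_threes_alt
  obtain ⟨f, hres, hlt⟩ := loop1B_spec (N : Int) ((N : Int) + 1 - 3 ^ 0).toNat 0 le_rfl
  norm_num at hres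
  simp only [hres]
  have hltN : N < 3 ^ (f + 1) := by exact_mod_cast hlt
  rw [loop2B_spec f N [] hltN]
  simp

-- ===== VERDICT (by name: the statement is the Claim_ definition above) =====
theorem sum_of_threes_spec : Claim_equal_sum_of_threes := by
  intro n _
  unfold Spec_sum_of_threes
  by_cases h : 0 ≤ n
  · obtain ⟨N, rfl⟩ := Int.eq_ofNat_of_zero_le h
    rw [A_nonneg N, B_nonneg N]
  · have hneg : n < 0 := by omega
    rw [B_neg n hneg]
    unfold sum_of_threes
    rw [loopA_neg n.natAbs n [] le_rfl hneg]
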